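-- pv_equiv track=rewrite | github.com/FlutterGenerator/myfile | Download/Telegram/hbclabel.py | w_label
-- ===== SOURCE A (Python) =====
-- def w_label(tar, sub_f):
--     ofs = 0
--     for i in range(len(sub_f)):
--         l = sub_f[i].strip()
--         if l.startswith(';') or l == '':
--             continue
--         spl = l.split(', ')
--         for j in range(len(spl)):
--             k = 1 if j == 0 and not spl[j] in ['AsyncBreakCheck', 'CompleteGenerator', 'Debugger', 'DebuggerCheckBreak', 'StartGenerator', 'Unreachable'] else 0
--             if '16:' in spl[j]:
--                 ofs += 2 + k
--             elif '32:' in spl[j]: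
--                 ofs += 4 + k
--             elif '64:' in spl[j] or 'Double:' in spl[j]:
--                 ofs += 8 + k
--             else:
--                 ofs += 1 + k
--         if ofs == tar:
--             return i
-- ===== SOURCE B (Python) =====
-- _NO_BONUS = ('AsyncBreakCheck', 'CompleteGenerator', 'Debugger',
--              'DebuggerCheckBreak', 'StartGenerator', 'Unreachable')
--
--
-- def _width(tok):
--     if '16:' in tok:
--         return 2
--     if '32:' in tok:
--         return 4
--     if '64:' in tok or 'Double:' in tok:
--         return 8
--     return 1
--
--
-- def _size(line):
--     spl = line.split(', ')
--     bonus = 0 if spl[0] in _NO_BONUS else 1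
--     return bonus + sum(_width(t) for t in spl)
--
--
-- def w_label(tar, sub_f):
--     # Stage 1: parallel tables of kept line indices and cumulative byte offsets.
--     idxs = []
--     offs = []
--     total = 0
--     for i, raw in enumerate(sub_f):
--         l = raw.strip()
--         if l and not l.startswith(';'):
--             total += _size(l)
--             idxs.append(i)
--             offs.append(total)
--     # Stage 2: offs is strictly increasing (every kept line contributes >= 1
--     # byte), so binary-search it for tar.
--     lo, hi = 0, len(offs)
--     while lo < hi:
--         mid = (lo + hi) // 2
--         if offs[mid] < tar:
--             lo = mid + 1
--         else:
--             hi = mid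
--     if lo < len(offs) and offs[lo] == tar:
--         return idxs[lo]
--     return None
-- ===== Notes on version B (the rewrite author's own statement) =====
-- stated objective: alternative
-- what changed: B replaces A's single pass with in-loop equality test and early return by two stages: one pass builds parallel tables of kept line indices and cumulative offsets (which are strictly increasing since each kept line contributes at least 1 byte), then a hand-written binary search over the offset table locates the target.
import Mathlib
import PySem

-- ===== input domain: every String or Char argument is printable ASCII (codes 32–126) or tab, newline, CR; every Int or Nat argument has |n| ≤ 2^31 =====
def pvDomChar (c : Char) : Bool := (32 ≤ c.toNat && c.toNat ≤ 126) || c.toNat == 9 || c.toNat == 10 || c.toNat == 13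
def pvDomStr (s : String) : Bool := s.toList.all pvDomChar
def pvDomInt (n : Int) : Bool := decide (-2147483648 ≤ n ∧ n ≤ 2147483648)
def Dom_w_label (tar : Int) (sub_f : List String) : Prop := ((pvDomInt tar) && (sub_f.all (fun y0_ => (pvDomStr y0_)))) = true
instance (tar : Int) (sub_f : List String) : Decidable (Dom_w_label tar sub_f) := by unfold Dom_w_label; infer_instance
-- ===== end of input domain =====

-- B stages the work differently: one pass builds parallel tables of kept line indices and
-- strictly increasing cumulative offsets, then a binary search over the offsets finds the target.

-- ===== PORT A =====
def w_label_go (tar : Int) : List String → Int → Int → Option Int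
  | [], _, _ => none
  | s :: rest, i, ofs =>
    let l := PySem.Str.strip s
    if PySem.Str.startswith l ";" || l == "" then
      w_label_go tar rest (i + 1) ofs
    else
      let spl := (PySem.Str.split? l ", ").getD [""]
      let ofs' := (PySem.List.pyRange 0 (spl.length : Int) 1).foldl
        (fun acc j =>
          let t := PySem.List.pyGetD spl j ""
          let k : Int := if j == 0 && !(["AsyncBreakCheck", "CompleteGenerator", "Debugger",
              "DebuggerCheckBreak", "StartGenerator", "Unreachable"].contains t) then 1 else 0
          if PySem.Str.isIn "16:" t then acc + (2 + k)
          else if PySem.Str.isIn "32:" t then acc + (4 + k)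
          else if PySem.Str.isIn "64:" t || PySem.Str.isIn "Double:" t then acc + (8 + k)
          else acc + (1 + k)) ofs
      if ofs' == tar then some i else w_label_go tar rest (i + 1) ofs'

def w_label (tar : Int) (sub_f : List String) : Option Int :=
  w_label_go tar sub_f 0 0

-- ===== PORT B =====
def pvNoBonus : List String :=
  ["AsyncBreakCheck", "CompleteGenerator", "Debugger",
   "DebuggerCheckBreak", "StartGenerator", "Unreachable"]

def pvWidth (t : String) : Int :=
  if PySem.Str.isIn "16:" t then 2
  else if PySem.Str.isIn "32:" t then 4
  else if PySem.Str.isIn "64:" t || PySem.Str.isIn "Double:" t then 8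
  else 1

def pvSize (line : String) : Int :=
  let spl := (PySem.Str.split? line ", ").getD [""]
  let bonus : Int := if pvNoBonus.contains (spl.headD "") then 0 else 1
  bonus + (spl.map pvWidth).sum

-- stage 1: the `for i, raw in enumerate(sub_f)` loop appending to idxs/offs
def pvCollect : List String → Int → (List Int × List Int × Int) → (List Int × List Int × Int)
  | [], _, st => st
  | raw :: tl, i, st =>
    let l := PySem.Str.strip raw
    if !(l == "") && !(PySem.Str.startswith l ";") then
      pvCollect tl (i + 1) (st.1 ++ [i], st.2.1 ++ [st.2.2 + pvSize l], st.2.2 + pvSize l)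
    else
      pvCollect tl (i + 1) st

-- stage 2: the `while lo < hi` binary-search loop of Source B
def pvBsearch (offs : List Int) (tar : Int) (lo hi : Nat) : Nat :=
  if h : lo < hi then
    let mid := (lo + hi) / 2
    if offs.getD mid 0 < tar then pvBsearch offs tar (mid + 1) hi
    else pvBsearch offs tar lo mid
  else lo
termination_by hi - lo
decreasing_by all_goals omega

def w_label_alt (tar : Int) (sub_f : List String) : Option Int :=
  let st := pvCollect sub_f 0 ([], [], 0)
  let idxs := st.1
  let offs := st.2.1
  let lo := pvBsearch offs tar 0 offs.length
  if lo < offs.length ∧ offs.getD lo 0 = tar then some (idxs.getD lo 0) else none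

-- ===== PRECONDITION & SPEC =====
def Spec_w_label (tar : Int) (sub_f : List String) (out : Option Int) : Prop := out = w_label_alt tar sub_f
instance (tar : Int) (sub_f : List String) (out : Option Int) : Decidable (Spec_w_label tar sub_f out) := by unfold Spec_w_label; infer_instance

-- ===== CLAIM (what is proved, stated in full; the proofs are below) =====
def Claim_equal_w_label : Prop := ∀ (tar : Int) (sub_f : List String), Dom_w_label tar sub_f → Spec_w_label tar sub_f (w_label tar sub_f)

-- ===== LEMMAS AND PROOFS =====

theorem splitOn_go_ne_nil (sep : List Char) :
    ∀ (fuel : Nat) (l cur : List Char) (acc : List (List Char)),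
      PySem.Chars.splitOn.go sep fuel l cur acc ≠ [] := by
  intro fuel
  induction fuel with
  | zero => intro l cur acc; simp [PySem.Chars.splitOn.go]
  | succ n ih =>
    intro l cur acc
    cases l with
    | nil => simp [PySem.Chars.splitOn.go]
    | cons c rest =>
      rw [PySem.Chars.splitOn.go]
      split
      · exact ih _ _ _
      · exact ih _ _ _

theorem split_comma_ne_nil (l : String) :
    (PySem.Str.split? l ", ").getD [""] ≠ [] := by
  simp [PySem.Str.split?, PySem.Chars.split?, PySem.Chars.splitOn]
  intro h
  exact splitOn_go_ne_nil _ _ _ _ _ h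

theorem ksum_zero (k : Int × String → Int)
    (hk : ∀ p, k p = if p.1 == 0 && !(pvNoBonus.contains p.2) then 1 else 0) :
    ∀ (rest : List String) (s : Int), 1 ≤ s →
      ((PySem.List.enumerate rest s).map k).sum = 0 := by
  intro rest
  induction rest with
  | nil => intro s _; simp [PySem.List.enumerate_nil]
  | cons x xs ih =>
    intro s hs
    rw [PySem.List.enumerate_cons]
    have hz : (s == 0) = false := by simp; omega
    simp [hk, hz, ih (s + 1) (by omega)]

theorem inner_list_eq (spl : List String) (hne : spl ≠ []) (ofs : Int) :
    (PySem.List.pyRange 0 ((spl.length : Int)) 1).foldl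
      (fun acc j =>
        let t := PySem.List.pyGetD spl j ""
        let k : Int := if j == 0 && !(["AsyncBreakCheck", "CompleteGenerator", "Debugger",
            "DebuggerCheckBreak", "StartGenerator", "Unreachable"].contains t) then 1 else 0
        if PySem.Str.isIn "16:" t then acc + (2 + k)
        else if PySem.Str.isIn "32:" t then acc + (4 + k)
        else if PySem.Str.isIn "64:" t || PySem.Str.isIn "Double:" t then acc + (8 + k)
        else acc + (1 + k)) ofs
      = ofs + ((if pvNoBonus.contains (spl.headD "") then 0 else (1 : Int))
          + (spl.map pvWidth).sum) := by
  obtain ⟨h, rest, rfl⟩ := List.exists_cons_of_ne_nil hne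
  have he := PySem.List.enumerate_eq_map_pyRange (h :: rest) ""
  rw [PySem.List.len_eq] at he
  calc (PySem.List.pyRange 0 (((h :: rest).length : Int)) 1).foldl _ ofs
      = (PySem.List.enumerate (h :: rest) 0).foldl
          (fun acc p =>
            let t := p.2
            let k : Int := if p.1 == 0 && !(["AsyncBreakCheck", "CompleteGenerator", "Debugger",
                "DebuggerCheckBreak", "StartGenerator", "Unreachable"].contains t) then 1 else 0
            if PySem.Str.isIn "16:" t then acc + (2 + k)
            else if PySem.Str.isIn "32:" t then acc + (4 + k)
            else if PySem.Str.isIn "64:" t || PySem.Str.isIn "Double:" t then acc + (8 + k)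
            else acc + (1 + k)) ofs := by
        rw [he, List.foldl_map]
    _ = (PySem.List.enumerate (h :: rest) 0).foldl
          (fun acc p => acc + (pvWidth p.2
            + (if p.1 == 0 && !(pvNoBonus.contains p.2) then (1 : Int) else 0))) ofs := by
        apply PySem.List.foldl_congr_mem
        intro acc p _
        simp only [pvWidth, pvNoBonus]
        split_ifs <;> ring
    _ = ofs + (((PySem.List.enumerate (h :: rest) 0).map
          (fun p => pvWidth p.2
            + (if p.1 == 0 && !(pvNoBonus.contains p.2) then (1 : Int) else 0))).sum) := by
        rw [PySem.List.foldl_add]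
    _ = ofs + ((((h :: rest).map pvWidth).sum)
          + (((PySem.List.enumerate (h :: rest) 0).map
              (fun p => if p.1 == 0 && !(pvNoBonus.contains p.2) then (1 : Int) else 0)).sum)) := by
        rw [PySem.List.sum_map_add_int]
        congr 1
        congr 1
        rw [show (fun (p : Int × String) => pvWidth p.2)
              = (pvWidth ∘ (fun (p : Int × String) => p.2)) from rfl,
            ← List.map_map, PySem.List.map_snd_enumerate]
    _ = ofs + ((if pvNoBonus.contains ((h :: rest).headD "") then 0 else (1 : Int))
          + ((h :: rest).map pvWidth).sum) := by
        rw [PySem.List.enumerate_cons]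
        simp only [List.map_cons, List.sum_cons]
        rw [show (0:Int)+1 = 1 from by norm_num, ksum_zero _ (fun p => rfl) rest 1 (by norm_num)]
        simp only [List.headD_cons]
        by_cases hc : h ∈ pvNoBonus
        · simp [hc]
        · simp [hc]
          ring

theorem inner_eq (l : String) (ofs : Int) :
    (PySem.List.pyRange 0 ((((PySem.Str.split? l ", ").getD [""]).length : Int)) 1).foldl
      (fun acc j =>
        let t := PySem.List.pyGetD ((PySem.Str.split? l ", ").getD [""]) j ""
        let k : Int := if j == 0 && !(["AsyncBreakCheck", "CompleteGenerator", "Debugger",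
            "DebuggerCheckBreak", "StartGenerator", "Unreachable"].contains t) then 1 else 0
        if PySem.Str.isIn "16:" t then acc + (2 + k)
        else if PySem.Str.isIn "32:" t then acc + (4 + k)
        else if PySem.Str.isIn "64:" t || PySem.Str.isIn "Double:" t then acc + (8 + k)
        else acc + (1 + k)) ofs = ofs + pvSize l := by
  have hne := split_comma_ne_nil l
  simp only [pvSize]
  exact inner_list_eq _ hne ofs

-- the (original index, cumulative offset) table both programs implicitly traverse
def pvBuild : List String → Int → Int → List (Int × Int)
  | [], _, _ => []
  | s :: tl, i, ofs =>
    let l := PySem.Str.strip s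
    if !(l == "") && !(PySem.Str.startswith l ";") then
      (i, ofs + pvSize l) :: pvBuild tl (i + 1) (ofs + pvSize l)
    else pvBuild tl (i + 1) ofs

theorem go_eq_find (tar : Int) :
    ∀ (rest : List String) (i ofs : Int),
      w_label_go tar rest i ofs
        = ((pvBuild rest i ofs).find? (fun p => p.2 == tar)).map Prod.fst := by
  intro rest
  induction rest with
  | nil => intro i ofs; simp [w_label_go, pvBuild]
  | cons s tl ih =>
    intro i ofs
    rw [w_label_go, pvBuild]
    simp only [inner_eq]
    by_cases hemp : (PySem.Str.strip s = "")
    · simp [hemp, ih]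
    · by_cases hst : PySem.Str.startswith (PySem.Str.strip s) ";"
      · have hst' : PySem.Chars.startswith (PySem.Chars.strip s.toList) [';'] = true := by
          simpa using hst
        simp [hst', ih]
      · have hst' : PySem.Chars.startswith (PySem.Chars.strip s.toList) [';'] = false := by
          simpa using hst
        by_cases he : ofs + pvSize (PySem.Str.strip s) = tar
        · simp [hemp, hst', he]
        · simp [hemp, hst', he, ih]

theorem pvCollect_eq : ∀ (rest : List String) (i ofs : Int) (xs os : List Int),
    pvCollect rest i (xs, os, ofs)
      = (xs ++ (pvBuild rest i ofs).map Prod.fst,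
         os ++ (pvBuild rest i ofs).map Prod.snd,
         ((pvBuild rest i ofs).map Prod.snd).getLastD ofs) := by
  intro rest
  induction rest with
  | nil => intro i ofs xs os; simp [pvCollect, pvBuild]
  | cons s tl ih =>
    intro i ofs xs os
    simp only [pvCollect, pvBuild]
    by_cases hc : (!(PySem.Str.strip s == "") && !(PySem.Str.startswith (PySem.Str.strip s) ";")) = true
    · rw [if_pos hc, if_pos hc, ih]
      simp only [List.map_cons, List.getLastD_cons, List.append_assoc, List.cons_append,
        List.nil_append]
    · rw [if_neg hc, if_neg hc, ih]

theorem pvWidth_ge_one (t : String) : 1 ≤ pvWidth t := by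
  unfold pvWidth; split_ifs <;> norm_num

theorem sum_widths_nonneg : ∀ (l : List String), 0 ≤ (l.map pvWidth).sum := by
  intro l
  induction l with
  | nil => simp
  | cons h tl ih =>
    simp only [List.map_cons, List.sum_cons]
    have := pvWidth_ge_one h
    omega

theorem pvSize_pos (l : String) : 1 ≤ pvSize l := by
  unfold pvSize
  obtain ⟨h, rest, he⟩ := List.exists_cons_of_ne_nil (split_comma_ne_nil l)
  rw [he]
  simp only [List.map_cons, List.sum_cons]
  have h1 := pvWidth_ge_one h
  have h2 := sum_widths_nonneg rest
  split_ifs <;> omega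

theorem build_snd_incr : ∀ (rest : List String) (i ofs : Int),
    (∀ o ∈ (pvBuild rest i ofs).map Prod.snd, ofs < o) ∧
    List.Pairwise (· < ·) ((pvBuild rest i ofs).map Prod.snd) := by
  intro rest
  induction rest with
  | nil => intro i ofs; simp [pvBuild]
  | cons s tl ih =>
    intro i ofs
    rw [pvBuild]
    split
    · obtain ⟨hmem, hpw⟩ := ih (i + 1) (ofs + pvSize (PySem.Str.strip s))
      have hsz := pvSize_pos (PySem.Str.strip s)
      constructor
      · intro o ho
        simp only [List.map_cons, List.mem_cons] at ho
        rcases ho with rfl | ho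
        · omega
        · have := hmem o ho; omega
      · simp only [List.map_cons, List.pairwise_cons]
        exact ⟨fun o ho => hmem o ho, hpw⟩
    · exact ih (i + 1) ofs

theorem pvBsearch_spec (os : List Int) (tar : Int)
    (hsort : ∀ j k, j < k → k < os.length → os.getD j 0 < os.getD k 0) :
    ∀ (n lo hi : Nat), hi - lo = n → lo ≤ hi → hi ≤ os.length →
      (∀ j, j < lo → os.getD j 0 < tar) →
      (∀ j, hi ≤ j → j < os.length → tar ≤ os.getD j 0) →
      (∀ j, j < pvBsearch os tar lo hi → os.getD j 0 < tar) ∧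
      (∀ j, pvBsearch os tar lo hi ≤ j → j < os.length → tar ≤ os.getD j 0) ∧
      pvBsearch os tar lo hi ≤ os.length := by
  intro n
  induction n using Nat.strong_induction_on with
  | _ n ih =>
    intro lo hi hn hlh hhl Hlo Hhi
    rw [pvBsearch]
    by_cases h : lo < hi
    · simp only [h, dite_true]
      by_cases hc : os.getD ((lo + hi) / 2) 0 < tar
      · simp only [hc, if_true]
        refine ih (hi - ((lo + hi) / 2 + 1)) (by omega) _ _ rfl (by omega) hhl ?_ Hhi
        intro j hj
        by_cases hje : j = (lo + hi) / 2
        · subst hje; exact hc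
        · by_cases hjlo : j < lo
          · exact Hlo j hjlo
          · have hjm : j < (lo + hi) / 2 := by omega
            have hmlen : (lo + hi) / 2 < os.length := by omega
            exact lt_trans (hsort j _ hjm hmlen) hc
      · simp only [hc, if_false]
        refine ih ((lo + hi) / 2 - lo) (by omega) _ _ rfl (by omega) (by omega) Hlo ?_
        intro j hjm hjlen
        by_cases hje : j = (lo + hi) / 2
        · subst hje; omega
        · have hmj : (lo + hi) / 2 < j := by omega
          have : os.getD ((lo + hi) / 2) 0 < os.getD j 0 := hsort _ j hmj hjlen
          omega
    · simp only [h, dite_false]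
      exact ⟨Hlo, fun j hj hjl => Hhi j (by omega) hjl, by omega⟩

theorem find?_eq_some_of_first {α : Type} (p : α → Bool) :
    ∀ (l : List α) (r : Nat) (hr : r < l.length),
      (∀ j (hj : j < l.length), j < r → p l[j] = false) → p l[r] = true →
      l.find? p = some l[r] := by
  intro l
  induction l with
  | nil => intro r hr; simp at hr
  | cons a tl ih =>
    intro r hr hbefore hmatch
    cases r with
    | zero => simp at hmatch ⊢; simp [hmatch]
    | succ r' =>
      have ha : p a = false := hbefore 0 (by simp) (by omega)
      rw [List.find?_cons, ha]
      simp only [List.getElem_cons_succ] at hmatch ⊢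
      exact ih r' (by simpa using hr)
        (fun j hj hjr => hbefore (j + 1) (by simpa using hj) (by omega)) hmatch

theorem bsearch_result (P : List (Int × Int)) (tar : Int)
    (hpw : List.Pairwise (· < ·) (P.map Prod.snd)) :
    (if pvBsearch (P.map Prod.snd) tar 0 (P.map Prod.snd).length < (P.map Prod.snd).length ∧
        (P.map Prod.snd).getD (pvBsearch (P.map Prod.snd) tar 0 (P.map Prod.snd).length) 0 = tar
     then some ((P.map Prod.fst).getD (pvBsearch (P.map Prod.snd) tar 0 (P.map Prod.snd).length) 0)
     else none)
      = (P.find? (fun p => p.2 == tar)).map Prod.fst := by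
  set os := P.map Prod.snd with hos
  have hlen : os.length = P.length := by simp [hos]
  have hsort : ∀ j k, j < k → k < os.length → os.getD j 0 < os.getD k 0 := by
    intro j k hjk hk
    rw [List.getD_eq_getElem os 0 (by omega), List.getD_eq_getElem os 0 hk]
    exact (List.pairwise_iff_getElem.mp hpw) j k (by omega) hk hjk
  obtain ⟨H1, H2, hr⟩ := pvBsearch_spec os tar hsort (os.length - 0) 0 os.length rfl
    (by omega) (le_refl _) (by omega) (by intro j hj hjl; omega)
  set r := pvBsearch os tar 0 os.length with hrdef
  have hosget : ∀ j (hj : j < P.length), os.getD j 0 = (P[j]).2 := by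
    intro j hj
    rw [List.getD_eq_getElem os 0 (by omega)]
    simp [hos]
  by_cases hcond : r < os.length ∧ os.getD r 0 = tar
  · rw [if_pos hcond]
    obtain ⟨hrl, hrt⟩ := hcond
    have hrP : r < P.length := by omega
    have hfind : P.find? (fun p => p.2 == tar) = some P[r] := by
      apply find?_eq_some_of_first
      · intro j hj hjr
        have := H1 j hjr
        rw [hosget j hj] at this
        have hne : ¬ (P[j]).2 = tar := by omega
        simp [hne]
      · rw [hosget r hrP] at hrt
        simp [hrt]
    rw [hfind]
    rw [List.getD_eq_getElem (P.map Prod.fst) 0 (by simp; omega)]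
    simp
  · rw [if_neg hcond]
    symm
    simp only [Option.map_eq_none_iff]
    rw [List.find?_eq_none]
    intro x hx
    obtain ⟨j, hj, rfl⟩ := List.mem_iff_getElem.mp hx
    simp only [beq_iff_eq]
    intro heq
    have hjo : os.getD j 0 = tar := by rw [hosget j hj]; exact heq
    by_cases hjr : j < r
    · have := H1 j hjr; omega
    · have hjlen : j < os.length := by omega
      have h2 := H2 j (by omega) hjlen
      have hrlen : r < os.length := by omega
      have hcond' : ¬ os.getD r 0 = tar := fun he => hcond ⟨hrlen, he⟩
      have h2r := H2 r (le_refl r) hrlen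
      by_cases hje : j = r
      · subst hje; omega
      · have : os.getD r 0 < os.getD j 0 := hsort r j (by omega) hjlen
        omega

-- ===== VERDICT (by name: the statement is the Claim_ definition above) =====
theorem w_label_spec : Claim_equal_w_label := by
  intro tar sub_f _
  unfold Spec_w_label w_label w_label_alt
  rw [go_eq_find, pvCollect_eq]
  have hpw := (build_snd_incr sub_f 0 0).2
  simpa using (bsearch_result (pvBuild sub_f 0 0) tar hpw).symm
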